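-- pv_equiv track=rewrite | github.com/swarnabhK/CrackingTheCodingInterviewSolutions | Chapter1/URLify.py | remove_trailing_spaces
-- ===== SOURCE A (Python) =====
-- def remove_trailing_spaces(s):
--   ends = len(s)-1
--   for i in range(ends,-1,-1):
--     if(s[i]==' '):
--       ends-=1
--     else:
--       break
--   return ends
-- ===== SOURCE B (Python) =====
-- def remove_trailing_spaces(s):
--   last = -1
--   for i, c in enumerate(s):
--     if c != ' ':
--       last = i
--   return last
-- ===== Notes on version B (the rewrite author's own statement) =====
-- stated objective: alternative
-- what changed: B replaces A's backward scan-with-break (decrementing a trailing counter) by a single forward pass with an accumulator holding the last non-space index seen.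
import Mathlib
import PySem

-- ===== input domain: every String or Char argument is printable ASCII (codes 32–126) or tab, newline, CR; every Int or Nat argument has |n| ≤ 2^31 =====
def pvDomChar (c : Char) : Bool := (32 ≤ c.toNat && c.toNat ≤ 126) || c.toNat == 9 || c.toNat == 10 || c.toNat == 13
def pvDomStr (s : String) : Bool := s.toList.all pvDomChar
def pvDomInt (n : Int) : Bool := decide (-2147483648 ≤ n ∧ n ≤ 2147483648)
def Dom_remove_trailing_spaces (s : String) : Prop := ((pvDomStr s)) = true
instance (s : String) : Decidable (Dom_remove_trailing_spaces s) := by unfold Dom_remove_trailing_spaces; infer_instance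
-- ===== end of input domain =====

-- B replaces A's backward scan-with-break by a single forward pass with a last-non-space accumulator; alternative decomposition, not faster.

-- ===== PORT A =====
-- A's loop: for i in range(len(s)-1, -1, -1): if s[i]==' ': ends -= 1 else: break
def rtsGoA (l : List Char) : List Int → Int → Int
  | [], ends => ends
  | i :: rest, ends =>
    if PySem.List.pyGet? l i == some ' ' then rtsGoA l rest (ends - 1) else ends

def remove_trailing_spaces (s : String) : Int :=
  let ends : Int := (s.toList.length : Int) - 1
  rtsGoA s.toList (PySem.List.pyRange ends (-1) (-1)) ends

-- ===== PORT B =====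
-- B's loop: for i, c in enumerate(s): if c != ' ': last = i
def rtsGoB : List (Int × Char) → Int → Int
  | [], last => last
  | (i, c) :: rest, last => rtsGoB rest (if c ≠ ' ' then i else last)

def remove_trailing_spaces_alt (s : String) : Int :=
  rtsGoB (PySem.List.enumerate s.toList 0) (-1)

-- ===== PRECONDITION & SPEC =====
def Spec_remove_trailing_spaces (s : String) (out : Int) : Prop := out = remove_trailing_spaces_alt s
instance (s : String) (out : Int) : Decidable (Spec_remove_trailing_spaces s out) := by unfold Spec_remove_trailing_spaces; infer_instance

-- ===== CLAIM (what is proved, stated in full; the proofs are below) =====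
def Claim_equal_remove_trailing_spaces : Prop := ∀ (s : String), Dom_remove_trailing_spaces s → Spec_remove_trailing_spaces s (remove_trailing_spaces s)

-- ===== LEMMAS AND PROOFS =====

-- A's value on a list of characters (the body of remove_trailing_spaces)
def rtsA (l : List Char) : Int :=
  rtsGoA l (PySem.List.pyRange ((l.length : Int) - 1) (-1) (-1)) ((l.length : Int) - 1)

-- B's value on a list of characters
def rtsB (l : List Char) : Int := rtsGoB (PySem.List.enumerate l 0) (-1)

theorem rtsGoA_congr (l l' : List Char) (r : List Int) (e : Int)
    (h : ∀ i ∈ r, PySem.List.pyGet? l i = PySem.List.pyGet? l' i) :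
    rtsGoA l r e = rtsGoA l' r e := by
  induction r generalizing e with
  | nil => rfl
  | cons i rest ih =>
    simp only [rtsGoA, h i (List.mem_cons_self)]
    split
    · exact ih (e - 1) (fun j hj => h j (List.mem_cons_of_mem _ hj))
    · rfl

theorem pyGet?_append_left_of_lt (l : List Char) (c : Char) (i : Int)
    (h0 : 0 ≤ i) (h1 : i < (l.length : Int)) :
    PySem.List.pyGet? (l ++ [c]) i = PySem.List.pyGet? l i := by
  rw [PySem.List.pyGet?_of_nonneg (l ++ [c]) h0, PySem.List.pyGet?_of_nonneg l h0]
  have hi : i.toNat < l.length := by omega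
  rw [List.getElem?_append_left hi]

theorem rtsA_snoc (l : List Char) (c : Char) :
    rtsA (l ++ [c]) = if c = ' ' then rtsA l else (l.length : Int) := by
  have hlen : ((l ++ [c]).length : Int) - 1 = (l.length : Int) := by
    simp
  unfold rtsA
  rw [hlen]
  rw [PySem.List.pyRange_neg_one_cons (by omega)]
  have hhead : PySem.List.pyGet? (l ++ [c]) (l.length : Int) = some c := by
    exact PySem.List.pyGet?_append_length l [] c
  simp only [rtsGoA, hhead]
  by_cases hc : c = ' '
  · subst hc
    simp only [beq_self_eq_true, if_true]
    exact rtsGoA_congr _ l _ _ (fun i hi => by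
      rw [PySem.List.mem_pyRange_neg_one] at hi
      exact pyGet?_append_left_of_lt l ' ' i (by omega) (by omega))
  · have : (some c == some ' ') = false := by
      simp [hc]
    rw [this]
    simp [hc]

theorem rtsB_snoc (l : List Char) (c : Char) :
    rtsB (l ++ [c]) = if c = ' ' then rtsB l else (l.length : Int) := by
  have key : ∀ (xs : List (Int × Char)) (i : Int) (a : Int),
      rtsGoB (xs ++ [(i, c)]) a = if c = ' ' then rtsGoB xs a else i := by
    intro xs i a
    induction xs generalizing a with
    | nil => by_cases h : c = ' ' <;> simp [rtsGoB, h]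
    | cons p rest ih =>
      obtain ⟨j, d⟩ := p
      simp only [List.cons_append, rtsGoB]
      exact ih _
  unfold rtsB
  rw [PySem.List.enumerate_append, PySem.List.enumerate_cons, PySem.List.enumerate_nil]
  simpa using key (PySem.List.enumerate l 0) (0 + (l.length : Int)) (-1)

theorem rtsA_eq_rtsB (l : List Char) : rtsA l = rtsB l := by
  induction l using List.reverseRecOn with
  | nil => rfl
  | append_singleton l c ih => rw [rtsA_snoc, rtsB_snoc, ih]

-- ===== VERDICT (by name: the statement is the Claim_ definition above) =====
theorem remove_trailing_spaces_spec : Claim_equal_remove_trailing_spaces := by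
  intro s _
  show remove_trailing_spaces s = remove_trailing_spaces_alt s
  exact rtsA_eq_rtsB s.toList
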